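-- pv_equiv track=rewrite | github.com/YuberHernany/algoritmos | elements_for_crypto/code/RSA/tools_message2blocks.py | join_blocks_starting_with_zero
-- ===== SOURCE A (Python) =====
-- def join_blocks_starting_with_zero(blocks):
--     """INPUTS: blocks (list of strings_of_digits)
--        OUTPUTS: (list) of string_of_digits that don't start with zero"""
--     new_blocks = [blocks[0]]
--     for block in blocks[1:]:
--         if block[0] != '0':
--             new_blocks.append(block)
--         else:
--             new_blocks[-1] += block
--     return new_blocks
-- ===== SOURCE B (Python) =====
-- def join_blocks_starting_with_zero(blocks):
--     """INPUTS: blocks (list of strings_of_digits)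
--        OUTPUTS: (list) of string_of_digits that don't start with zero"""
--     first = blocks[0]
--     i = 1
--     n = len(blocks)
--     out = []
--     while True:
--         j = i
--         while j < n and blocks[j][0] == '0':
--             j += 1
--         out.append(first + ''.join(blocks[i:j]))
--         if j == n:
--             return out
--         first = blocks[j]
--         i = j + 1
-- ===== Notes on version B (the rewrite author's own statement) =====
-- stated objective: alternative
-- what changed: A grows a result list and concatenates each '0'-starting block onto its last element inside one loop; B recurses group by group, peeling the maximal leading run of '0'-starting blocks and joining it onto the group head with ''.join, so the result is emitted one finished group at a time.
-- outside the precondition, e.g. on join_blocks_starting_with_zero([]): A raises IndexError, B raises IndexError; on join_blocks_starting_with_zero(['12', '']): A raises IndexError, B raises IndexError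
import Mathlib
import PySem

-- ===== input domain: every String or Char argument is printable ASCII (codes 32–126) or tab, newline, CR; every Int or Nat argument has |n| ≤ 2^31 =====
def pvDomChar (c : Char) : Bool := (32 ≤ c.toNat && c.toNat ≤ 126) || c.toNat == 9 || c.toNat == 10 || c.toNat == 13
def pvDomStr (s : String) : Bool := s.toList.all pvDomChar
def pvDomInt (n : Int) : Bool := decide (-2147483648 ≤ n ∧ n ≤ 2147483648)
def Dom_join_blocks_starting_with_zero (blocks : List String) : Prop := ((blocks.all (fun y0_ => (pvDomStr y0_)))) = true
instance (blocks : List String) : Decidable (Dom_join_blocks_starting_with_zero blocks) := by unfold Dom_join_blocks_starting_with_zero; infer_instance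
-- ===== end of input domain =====

-- B replaces A's accumulate-into-last-element loop by a run-at-a-time recursion
-- (peel the maximal run of '0'-starting blocks, join it onto the group head, recurse);
-- objective: alternative decomposition, same cost.

-- ===== PORT A =====
def join_blocks_starting_with_zero (blocks : List String) : List String :=
  match blocks with
  | [] => []  -- blocks[0] raises IndexError here: outside Pre_
  | b0 :: _ =>
    (PySem.List.slice blocks (some 1) none).foldl
      (fun new_blocks block =>
        if PySem.Str.pyGet? block 0 ≠ some '0' then
          new_blocks ++ [block]                                             -- new_blocks.append(block)
        else
          new_blocks.dropLast ++ [(new_blocks.getLast?.getD "") ++ block])  -- new_blocks[-1] += block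
      [b0]

-- ===== PORT B =====
-- B's inner while loop: peel the leading run of '0'-starting blocks off rest
-- (first component = zeros, second = the remaining rest)
def pvSplitZeros : List String → List String × List String
  | [] => ([], [])
  | b :: rest =>
    if PySem.Str.pyGet? b 0 = some '0' then
      ((b :: (pvSplitZeros rest).1), (pvSplitZeros rest).2)
    else ([], b :: rest)

-- needed by pvGo's decreasing_by
theorem pvSplitZeros_snd_length_le : ∀ rest : List String, (pvSplitZeros rest).2.length ≤ rest.length := by
  intro rest
  induction rest with
  | nil => simp [pvSplitZeros]
  | cons b r ih =>
    by_cases h : PySem.List.pyGet? b.toList 0 = some '0' <;> simp [pvSplitZeros, h] <;> omega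

-- B's recursive go(first, rest)
def pvGo (first : String) (rest : List String) : List String :=
  match h : pvSplitZeros rest with
  | (zeros, []) => [first ++ PySem.Str.join "" zeros]
  | (zeros, b :: rest') => (first ++ PySem.Str.join "" zeros) :: pvGo b rest'
termination_by rest.length
decreasing_by
  have hle := pvSplitZeros_snd_length_le rest
  rw [h] at hle
  simp only [List.length_cons] at hle ⊢
  omega

def join_blocks_starting_with_zero_alt (blocks : List String) : List String :=
  match blocks with
  | [] => []  -- blocks[0] raises IndexError here: outside Pre_
  | b0 :: rest => pvGo b0 rest

-- ===== PRECONDITION & SPEC =====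
-- Pre_ excludes exactly the inputs where Python A raises IndexError: the empty list
-- (blocks[0]) and lists in which some element after the first is "" (block[0]).
def Pre_join_blocks_starting_with_zero (blocks : List String) : Prop :=
  blocks ≠ [] ∧ ∀ b ∈ blocks.tail, b ≠ ""
instance (blocks : List String) : Decidable (Pre_join_blocks_starting_with_zero blocks) := by
  unfold Pre_join_blocks_starting_with_zero; infer_instance

def pvWitness_join_blocks_starting_with_zero : List String := ["12", "034", "5", "06"]

def Spec_join_blocks_starting_with_zero (blocks : List String) (out : List String) : Prop := out = join_blocks_starting_with_zero_alt blocks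
instance (blocks : List String) (out : List String) : Decidable (Spec_join_blocks_starting_with_zero blocks out) := by unfold Spec_join_blocks_starting_with_zero; infer_instance

-- ===== CLAIM (what is proved, stated in full; the proofs are below) =====
def Claim_equal_join_blocks_starting_with_zero : Prop := ∀ (blocks : List String), Dom_join_blocks_starting_with_zero blocks → Pre_join_blocks_starting_with_zero blocks → Spec_join_blocks_starting_with_zero blocks (join_blocks_starting_with_zero blocks)

-- ===== LEMMAS AND PROOFS =====

-- common recursive characterisation of the grouping, the bridge between the two ports
def pvSpec (acc : String) : List String → List String
  | [] => [acc]
  | b :: rest =>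
    if PySem.Str.pyGet? b 0 ≠ some '0' then acc :: pvSpec b rest
    else pvSpec (acc ++ b) rest

theorem pv_join_cons (b : String) (zs : List String) :
    PySem.Str.join "" (b :: zs) = b ++ PySem.Str.join "" zs := by
  cases zs with
  | nil => apply String.toList_injective; simp [PySem.Str.join, PySem.Chars.join, List.intercalate]
  | cons z zs' =>
    apply String.toList_injective
    simp [PySem.Str.join, PySem.Chars.join, List.intercalate]

theorem pv_append_assoc (a b c : String) : (a ++ b) ++ c = a ++ (b ++ c) := by
  apply String.toList_injective; simp

-- A's foldl, started on any state ending in acc, equals pvSpec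
theorem pvA_foldl_eq (rest : List String) : ∀ (pre : List String) (acc : String),
    rest.foldl
      (fun new_blocks block =>
        if PySem.Str.pyGet? block 0 ≠ some '0' then new_blocks ++ [block]
        else new_blocks.dropLast ++ [(new_blocks.getLast?.getD "") ++ block])
      (pre ++ [acc]) = pre ++ pvSpec acc rest := by
  induction rest with
  | nil => intro pre acc; simp [pvSpec]
  | cons b r ih =>
    intro pre acc
    by_cases h : PySem.List.pyGet? b.toList 0 = some '0'
    · have hstep : (if PySem.Str.pyGet? b 0 ≠ some '0' then pre ++ [acc] ++ [b]
          else (pre ++ [acc]).dropLast ++ [(pre ++ [acc]).getLast?.getD "" ++ b])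
          = pre ++ [acc ++ b] := by
        simp [h]
      rw [List.foldl_cons, hstep, ih pre (acc ++ b)]
      simp [pvSpec, h]
    · have hstep : (if PySem.Str.pyGet? b 0 ≠ some '0' then pre ++ [acc] ++ [b]
          else (pre ++ [acc]).dropLast ++ [(pre ++ [acc]).getLast?.getD "" ++ b])
          = (pre ++ [acc]) ++ [b] := by
        simp [h]
      rw [List.foldl_cons, hstep, ih (pre ++ [acc]) b]
      simp [pvSpec, h]

-- pvGo unfolded through a known pvSplitZeros value
theorem pvGo_eq (first : String) (rest zs r : List String) (h : pvSplitZeros rest = (zs, r)) :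
    pvGo first rest = (match r with
      | [] => [first ++ PySem.Str.join "" zs]
      | b :: r' => (first ++ PySem.Str.join "" zs) :: pvGo b r') := by
  rw [pvGo]
  split
  · rename_i zeros h'
    rw [h] at h'
    injection h' with h1 h2
    subst h1; subst h2
    rfl
  · rename_i zeros b r' h'
    rw [h] at h'
    injection h' with h1 h2
    subst h1; subst h2
    rfl

theorem pvGo_cons_zero (first b : String) (rest : List String)
    (h : PySem.List.pyGet? b.toList 0 = some '0') :
    pvGo first (b :: rest) = pvGo (first ++ b) rest := by
  rcases hr : pvSplitZeros rest with ⟨zs, r⟩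
  have hsc : pvSplitZeros (b :: rest) = (b :: zs, r) := by
    simp [pvSplitZeros, h, hr]
  rw [pvGo_eq first (b :: rest) (b :: zs) r hsc, pvGo_eq (first ++ b) rest zs r hr]
  cases r <;> simp [pv_join_cons, pv_append_assoc]

theorem pvGo_cons_nonzero (first b : String) (rest : List String)
    (h : ¬ PySem.List.pyGet? b.toList 0 = some '0') :
    pvGo first (b :: rest) = first :: pvGo b rest := by
  have hsc : pvSplitZeros (b :: rest) = ([], b :: rest) := by
    simp [pvSplitZeros, h]
  rw [pvGo_eq first (b :: rest) [] (b :: rest) hsc]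
  have hj : PySem.Str.join "" ([] : List String) = "" := by
    apply String.toList_injective; simp [PySem.Str.join, PySem.Chars.join, List.intercalate]
  have he : first ++ "" = first := by
    apply String.toList_injective; simp
  rw [hj, he]

-- B's go equals pvSpec
theorem pvB_go_eq (rest : List String) : ∀ (first : String),
    pvGo first rest = pvSpec first rest := by
  induction rest with
  | nil =>
    intro first
    rw [pvGo_eq first [] [] [] rfl]
    have hj : PySem.Str.join "" ([] : List String) = "" := by
      apply String.toList_injective; simp [PySem.Str.join, PySem.Chars.join, List.intercalate]
    have he : first ++ "" = first := by
      apply String.toList_injective; simp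
    rw [hj, he]; rfl
  | cons b r ih =>
    intro first
    by_cases h : PySem.List.pyGet? b.toList 0 = some '0'
    · rw [pvGo_cons_zero first b r h, ih (first ++ b)]
      simp [pvSpec, h]
    · rw [pvGo_cons_nonzero first b r h, ih b]
      simp [pvSpec, h]

-- ===== VERDICT (by name: the statement is the Claim_ definition above) =====
theorem join_blocks_starting_with_zero_spec : Claim_equal_join_blocks_starting_with_zero := by
  intro blocks _ _
  unfold Spec_join_blocks_starting_with_zero
  cases blocks with
  | nil => rfl
  | cons b0 rest =>
    simp only [join_blocks_starting_with_zero, join_blocks_starting_with_zero_alt]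
    have hs : PySem.List.slice (b0 :: rest) (some 1) none = rest := by
      simp [PySem.List.slice]
    rw [hs, pvB_go_eq]
    have := pvA_foldl_eq rest [] b0
    simpa using this
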